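-- pv_equiv track=rewrite | github.com/ShuvalovAnthony/ege | 9/63058/63058.py | check
-- ===== SOURCE A (Python) =====
-- def check(row):
--     if len(set(row)) == len(row): return False
--     row = sorted(row)
--
--     summa_povtor = 0
--     for num in row:
--         if row.count(num) > 1:
--             summa_povtor += num
--
--     if (
--         (row[-1] != row[-2]) and
--         (summa_povtor < row[-1])
--     ): return True
--     return False
-- ===== SOURCE B (Python) =====
-- def check(row):
--     seen = set()
--     dups = set()
--     rep = 0
--     m = None
--     for x in row:
--         if x in dups:
--             rep += x
--         elif x in seen:
--             dups.add(x)
--             rep += 2 * x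
--         else:
--             seen.add(x)
--         if m is None or x > m:
--             m = x
--     return bool(dups) and m not in dups and rep < m
-- ===== Notes on version B (the rewrite author's own statement) =====
-- stated objective: faster
-- what changed: A sorts the row, rescans it with row.count inside a second loop and tests the last two positions of the sorted list; B is a single online pass that maintains a seen-set, a duplicate-set, the running repeat-sum and the running maximum, deciding everything from that state with no sort, no second pass and no rescans.
import Mathlib
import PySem

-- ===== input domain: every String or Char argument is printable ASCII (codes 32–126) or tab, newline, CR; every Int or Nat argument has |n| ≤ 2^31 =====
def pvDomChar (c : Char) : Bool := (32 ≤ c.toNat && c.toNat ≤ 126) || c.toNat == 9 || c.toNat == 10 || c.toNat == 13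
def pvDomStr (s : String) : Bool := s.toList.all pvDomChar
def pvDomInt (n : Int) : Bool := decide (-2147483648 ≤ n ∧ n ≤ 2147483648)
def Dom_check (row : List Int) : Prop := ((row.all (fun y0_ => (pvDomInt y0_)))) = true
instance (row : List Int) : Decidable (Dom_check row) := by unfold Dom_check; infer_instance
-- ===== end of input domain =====

-- B replaces A's sort + count-rescan loop + positional last-two test by ONE online pass:
-- a seen-set, a set of duplicated values, the running repeat-sum and the running maximum
-- are maintained together, and the answer is read off that state.  Objective: faster.

-- ===== PORT A =====
def check (row : List Int) : Bool :=
  -- if len(set(row)) == len(row): return False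
  if (PySem.Set.ofList row).length == row.length then false
  else
    -- row = sorted(row)
    let r := PySem.List.sorted row (fun x => x) false
    -- summa_povtor loop: if row.count(num) > 1: summa_povtor += num
    let summa := r.foldl (fun acc num => if 1 < PySem.List.count r num then acc + num else acc) 0
    -- negative indexing of the last two elements: here duplicates exist so len(row) ≥ 2 and Python never raises;
    -- the catch-all arm is unreachable
    match PySem.List.pyGet? r (-1), PySem.List.pyGet? r (-2) with
    | some last, some second => decide (last ≠ second) && decide (summa < last)
    | _, _ => false

-- ===== PORT B =====
-- the loop body of Source B: update (seen, dups, rep, m) with the next element x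
def checkStep (st : PySem.Set Int × PySem.Set Int × Int × Option Int) (x : Int) :
    PySem.Set Int × PySem.Set Int × Int × Option Int :=
  let upd :=
    -- if x in dups: rep += x ; elif x in seen: dups.add(x); rep += 2*x ; else: seen.add(x)
    if PySem.Set.contains st.2.1 x then (st.1, st.2.1, st.2.2.1 + x)
    else if PySem.Set.contains st.1 x then (st.1, PySem.Set.add st.2.1 x, st.2.2.1 + 2 * x)
    else (PySem.Set.add st.1 x, st.2.1, st.2.2.1)
  -- if m is None or x > m: m = x
  let m' := match st.2.2.2 with
    | none => some x
    | some mv => if mv < x then some x else some mv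
  (upd.1, upd.2.1, upd.2.2, m')

def check_alt (row : List Int) : Bool :=
  let st := row.foldl checkStep ((PySem.Set.empty : PySem.Set Int), PySem.Set.empty, 0, none)
  -- return bool(dups) and m not in dups and rep < m
  !st.2.1.isEmpty &&
    (match st.2.2.2 with
     | some mv => !(PySem.Set.contains st.2.1 mv) && decide (st.2.2.1 < mv)
     | none => false)  -- unreachable: a duplicate exists, so the row is nonempty and m is set

-- ===== PRECONDITION & SPEC =====
def Spec_check (row : List Int) (out : Bool) : Prop := out = check_alt row
instance (row : List Int) (out : Bool) : Decidable (Spec_check row out) := by unfold Spec_check; infer_instance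

-- ===== CLAIM (what is proved, stated in full; the proofs are below) =====
def Claim_equal_check : Prop := ∀ (row : List Int), Dom_check row → Spec_check row (check row)

-- ===== LEMMAS AND PROOFS =====

-- A's value written with Counter-style quantities; both ports are reduced to this form.
def checkC (row : List Int) : Bool :=
  let counts := PySem.Dict.counter row
  if counts.size == row.length then false
  else match PySem.List.max? row (fun x => x) with
    | none => false
    | some m =>
      let rep := counts.items.foldl (fun acc p => if 1 < p.2 then acc + p.1 * p.2 else acc) 0
      decide (counts.getD m 0 = 1) && decide (rep < m)

-- the repeat-sum as a Finset sum (the invariant value of B's accumulator `rep`)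
def repSum (p : List Int) : Int :=
  ∑ k ∈ p.toFinset, if 1 < p.count k then k * (p.count k : Int) else 0

theorem sum_repeats_eq (l : List Int) :
    (l.filter (fun x => decide (1 < l.count x))).sum
      = (((PySem.Set.ofList l).filter (fun k => decide (1 < l.count k))).map
          (fun k => k * (l.count k : Int))).sum := by
  classical
  set p : Int → Bool := fun x => decide (1 < l.count x) with hp
  have hnd : (PySem.Set.ofList l).Nodup := PySem.Set.nodup_ofList l
  have hndf : ((PySem.Set.ofList l).filter p).Nodup := hnd.filter p
  rw [← List.sum_toFinset _ hndf]
  have htF : ((PySem.Set.ofList l).filter p).toFinset = (l.filter p).toFinset := by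
    ext x
    simp [List.mem_toFinset, PySem.Set.mem_ofList]
  rw [htF]
  have h2 := Finset.sum_list_map_count (l.filter p) (fun x => (x : Int))
  simp only [List.map_id'] at h2
  rw [h2]
  apply Finset.sum_congr rfl
  intro x hx
  have hpx : p x = true := (List.mem_filter.mp (List.mem_toFinset.mp hx)).2
  rw [List.count_filter hpx]
  ring

-- A's summa_povtor equals Counter's repeat-sum
theorem summa_eq_rep (row : List Int) :
    (PySem.List.sorted row (fun x => x) false).foldl
        (fun acc num => if 1 < PySem.List.count (PySem.List.sorted row (fun x => x) false) num then acc + num else acc) 0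
      = (PySem.Dict.counter row).items.foldl (fun acc p => if 1 < p.2 then acc + p.1 * p.2 else acc) 0 := by
  classical
  set r := PySem.List.sorted row (fun x => x) false with hr
  have hperm : r.Perm row := PySem.List.sorted_perm row (fun x => x) false
  have hL : r.foldl (fun acc num => if 1 < PySem.List.count r num then acc + num else acc) 0
      = (row.filter (fun x => decide (1 < row.count x))).sum := by
    have hc : ∀ (acc : Int) (x : Int), x ∈ r →
        (if 1 < PySem.List.count r x then acc + x else acc)
          = (if 1 < row.count x then acc + x else acc) := by
      intro acc x _
      rw [PySem.List.count_eq, hperm.count_eq]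
    rw [PySem.List.foldl_congr_mem _ _ _ _ hc, PySem.List.foldl_ite_eq_foldl_filter]
    have : (r.filter (fun x => decide (1 < row.count x))).Perm
        (row.filter (fun x => decide (1 < row.count x))) := hperm.filter _
    rw [show ∀ (L : List Int), L.foldl (fun acc x => acc + x) 0 = L.sum by
          intro L; rw [PySem.List.foldl_add L (fun x => x) 0]; simp]
    exact this.sum_eq
  have hR : (PySem.Dict.counter row).items.foldl (fun acc p => if 1 < p.2 then acc + p.1 * p.2 else acc) 0
      = (((PySem.Set.ofList row).filter (fun k => decide (1 < row.count k))).map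
          (fun k => k * (row.count k : Int))).sum := by
    rw [PySem.Dict.items_counter, List.foldl_map]
    have : ∀ (acc : Int) (k : Int), k ∈ PySem.Set.ofList row →
        (if 1 < ((row.count k : Int)) then acc + k * (row.count k : Int) else acc)
          = (if 1 < row.count k then acc + k * (row.count k : Int) else acc) := by
      intro acc k _
      congr 1
      simp
    rw [PySem.List.foldl_congr_mem _ _ _ _ this, PySem.List.foldl_ite_eq_foldl_filter]
    rw [PySem.List.foldl_add _ (fun k => k * (row.count k : Int)) 0]
    simp
  rw [hL, hR, sum_repeats_eq]

theorem sorted_last_eq_max (row : List Int) (m : Int)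
    (hm : PySem.List.max? row (fun y => y) = some m)
    (hn : 0 < (PySem.List.sorted row (fun x => x) false).length) :
    (PySem.List.sorted row (fun x => x) false)[(PySem.List.sorted row (fun x => x) false).length - 1]'(by omega) = m := by
  set r := PySem.List.sorted row (fun x => x) false with hr
  have hperm : r.Perm row := PySem.List.sorted_perm row (fun x => x) false
  have hmax := PySem.List.max?_isMax hm
  have hmem : m ∈ r := hperm.mem_iff.mpr (PySem.List.max?_mem hm)
  apply le_antisymm
  · exact hmax _ (hperm.mem_iff.mp (List.getElem_mem _))
  · obtain ⟨i, hi, hie⟩ := List.mem_iff_getElem.mp hmem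
    have hmono := PySem.List.sorted_id_getElem_mono (κ := Int) row (p := i) (q := r.length - 1)
      (by omega) (by rw [← hr]; omega)
    exact le_of_eq_of_le hie.symm hmono

theorem last_two_eq_iff_count (row : List Int) (m : Int)
    (hn : 2 ≤ (PySem.List.sorted row (fun x => x) false).length)
    (hlast : (PySem.List.sorted row (fun x => x) false)[(PySem.List.sorted row (fun x => x) false).length - 1]'(by omega) = m) :
    ((PySem.List.sorted row (fun x => x) false)[(PySem.List.sorted row (fun x => x) false).length - 2]'(by omega) = m
      ↔ 2 ≤ List.count m (PySem.List.sorted row (fun x => x) false)) := by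
  set r := PySem.List.sorted row (fun x => x) false with hr
  constructor
  · intro h2
    have hdrop : r.drop (r.length - 2) = [r[r.length - 2]'(by omega), r[r.length - 1]'(by omega)] := by
      apply List.ext_getElem
      · simp; omega
      · intro i hi hi2
        simp only [List.getElem_drop]
        have hi' : i < 2 := by simpa using hi2
        interval_cases i <;> simp <;> congr 1 <;> omega
    have hsub : (r.drop (r.length - 2)).Sublist r := List.drop_sublist _ _
    have := hsub.count_le m
    rw [hdrop, h2, hlast] at this
    simpa using this
  · intro hc
    by_contra hne
    have hle : r[r.length - 2]'(by omega) ≤ r[r.length - 1]'(by omega) :=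
      PySem.List.sorted_id_getElem_mono row (by omega) (by rw [← hr]; omega)
    have hlt : r[r.length - 2]'(by omega) < m := by
      rw [hlast] at hle; exact lt_of_le_of_ne hle hne
    have hsplit : r = r.take (r.length - 1) ++ r.drop (r.length - 1) := (List.take_append_drop _ _).symm
    have hdrop1 : r.drop (r.length - 1) = [m] := by
      apply List.ext_getElem
      · simp; omega
      · intro i hi hi2
        simp only [List.getElem_drop]
        have : i = 0 := by simp at hi2; omega
        subst this
        simp
        rw [← hlast]
    have htake : List.count m (r.take (r.length - 1)) = 0 := by
      rw [List.count_eq_zero]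
      intro hmem
      rw [List.mem_take_iff_getElem] at hmem
      obtain ⟨i, hi, hie⟩ := hmem
      have : r[i]'(by omega) ≤ r[r.length - 2]'(by omega) :=
        PySem.List.sorted_id_getElem_mono row (by omega) (by rw [← hr]; omega)
      rw [hie] at this
      omega
    have : List.count m r = 1 := by
      conv_lhs => rw [hsplit]
      rw [List.count_append, htake, hdrop1]
      simp
    rw [← hr] at hc
    omega

-- A equals the Counter form
theorem check_eq_checkC (row : List Int) : check row = checkC row := by
  simp only [check, checkC]
  have hsize : (PySem.Dict.counter row).size = (PySem.Set.ofList row).length := by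
    have hk := PySem.Dict.keys_counter (κ := Int) row
    have : (PySem.Dict.counter row).keys.length = (PySem.Dict.counter row).size := by
      simp [PySem.Dict.keys, PySem.Dict.size]
    rw [← this, hk]
  rw [hsize]
  by_cases hg : (PySem.Set.ofList row).length = row.length
  · simp [hg]
  · simp only [beq_iff_eq, hg, if_false]
    have hofl : (PySem.Set.ofList row).toFinset = row.toFinset := by
      ext x; simp [List.mem_toFinset, PySem.Set.mem_ofList]
    have hnd : ¬ row.Nodup := by
      intro h
      apply hg
      have h1 : (PySem.Set.ofList row).toFinset.card = (PySem.Set.ofList row).length :=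
        List.toFinset_card_of_nodup (PySem.Set.nodup_ofList row)
      have h2 : row.toFinset.card = row.length := List.toFinset_card_of_nodup h
      rw [hofl, h2] at h1
      omega
    have hdup : ∃ a : Int, 2 ≤ row.count a := by
      by_contra hno
      push Not at hno
      exact hnd (List.nodup_iff_count_le_one.mpr (fun a => by have := hno a; omega))
    have hlen2 : 2 ≤ row.length := by
      obtain ⟨a, ha⟩ := hdup
      have := List.count_le_length (a := a) (l := row)
      omega
    have hrl : (PySem.List.sorted row (fun x => x) false).length = row.length :=
      (PySem.List.sorted_perm row (fun x => x) false).length_eq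
    cases hm : PySem.List.max? row (fun y => y) with
    | none => exact absurd ((PySem.List.max?_eq_none_iff row _).mp hm) (by intro h; subst h; simp at hlen2)
    | some m =>
      have hget1 : PySem.List.pyGet? (PySem.List.sorted row (fun x => x) false) (-1)
          = some ((PySem.List.sorted row (fun x => x) false)[(PySem.List.sorted row (fun x => x) false).length - 1]'(by omega)) := by
        rw [PySem.List.pyGet?_neg_one, List.getLast?_eq_getElem?]
        exact List.getElem?_eq_getElem (by omega)
      have hget2 : PySem.List.pyGet? (PySem.List.sorted row (fun x => x) false) (-2)
          = some ((PySem.List.sorted row (fun x => x) false)[(PySem.List.sorted row (fun x => x) false).length - 2]'(by omega)) := by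
        rw [PySem.List.pyGet?_neg_ofNat _ 2 (by omega) (by omega)]
        exact List.getElem?_eq_getElem (by omega)
      rw [hget1, hget2]
      have hlast := sorted_last_eq_max row m hm (by omega)
      have hiff := last_two_eq_iff_count row m (by omega) hlast
      have hcnt : List.count m (PySem.List.sorted row (fun x => x) false) = List.count m row :=
        (PySem.List.sorted_perm row (fun x => x) false).count_eq m
      have hpos : 0 < List.count m row := List.count_pos_iff.mpr (PySem.List.max?_mem hm)
      have hgd : (PySem.Dict.counter row).getD m 0 = (List.count m row : Int) :=
        PySem.Dict.getD_counter row m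
      simp only [hlast, hgd, summa_eq_rep]
      congr 1
      apply decide_eq_decide.mpr
      constructor
      · intro h
        have : ¬ (2 ≤ List.count m (PySem.List.sorted row (fun x => x) false)) := fun h2 => h (hiff.mpr h2).symm
        have : List.count m row = 1 := by omega
        exact_mod_cast this
      · intro h
        have h1 : List.count m row = 1 := by exact_mod_cast h
        intro he
        exact absurd (hiff.mp he.symm) (by omega)

-- step lemma for the repeat-sum
theorem repSum_append (q : List Int) (x : Int) :
    repSum (q ++ [x])
      = repSum q + (if 2 ≤ q.count x then x else if q.count x = 1 then 2 * x else 0) := by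
  classical
  unfold repSum
  have hcnt : ∀ k : Int, (q ++ [x]).count k = q.count k + if x = k then 1 else 0 := by
    intro k
    simp [List.count_append, List.count_singleton]
  have htf : (q ++ [x]).toFinset = insert x q.toFinset := by
    simp [List.toFinset_append]
  rw [htf]
  have hmem : x ∈ insert x q.toFinset := Finset.mem_insert_self x _
  rw [← Finset.add_sum_erase _ _ hmem, Finset.erase_insert_eq_erase]
  have herase : ∀ k ∈ q.toFinset.erase x,
      (if 1 < (q ++ [x]).count k then k * ((q ++ [x]).count k : Int) else 0)
        = (if 1 < q.count k then k * (q.count k : Int) else 0) := by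
    intro k hk
    have hne : x ≠ k := fun h => (Finset.mem_erase.mp hk).1 h.symm
    rw [hcnt k, if_neg hne]
    simp
  rw [Finset.sum_congr rfl herase]
  have hx : (q ++ [x]).count x = q.count x + 1 := by rw [hcnt x]; simp
  by_cases h0 : q.count x = 0
  · have hnx : x ∉ q.toFinset := by
      simp [List.mem_toFinset, ← List.count_pos_iff, h0]
    rw [Finset.erase_eq_of_notMem hnx]
    rw [hx, h0]
    norm_num
  · have hxin : x ∈ q.toFinset := by
      rw [List.mem_toFinset, ← List.count_pos_iff]
      omega
    have hq : ∑ k ∈ q.toFinset, (if 1 < q.count k then k * (q.count k : Int) else 0)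
        = (if 1 < q.count x then x * (q.count x : Int) else 0)
          + ∑ k ∈ q.toFinset.erase x, (if 1 < q.count k then k * (q.count k : Int) else 0) :=
      (Finset.add_sum_erase _ _ hxin).symm
    rw [hq, hx]
    by_cases h1 : q.count x = 1
    · rw [h1]
      norm_num
      ring
    · have h2 : 2 ≤ q.count x := by omega
      rw [if_pos (by omega), if_pos (by omega), if_pos h2]
      push_cast
      ring

-- set(xs + [x]) is set(xs).add(x)
theorem ofList_append_singleton (q : List Int) (x : Int) :
    PySem.Set.ofList (q ++ [x]) = PySem.Set.add (PySem.Set.ofList q) x := by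
  rw [PySem.Set.ofList_eq_foldl, List.foldl_append, ← PySem.Set.ofList_eq_foldl]
  rfl

-- adding a present element is a no-op
theorem set_add_of_mem {s : PySem.Set Int} {x : Int} (h : x ∈ s) :
    PySem.Set.add s x = s := by
  simp only [PySem.Set.add]
  rw [if_pos ((PySem.Set.contains_iff s x).mpr h)]

-- running maximum over an appended element
theorem max?_id_append (q : List Int) (x : Int) :
    PySem.List.max? (q ++ [x]) (fun y => y)
      = (match PySem.List.max? q (fun y => y) with
         | none => some x
         | some mv => if mv < x then some x else some mv) := by
  cases q with
  | nil =>
    simp [PySem.List.max?]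
  | cons h t =>
    rw [List.cons_append, PySem.List.max?_id_cons, PySem.List.max?_id_cons, List.foldl_append]
    simp only [List.foldl]
    by_cases hlt : List.foldl max h t < x
    · rw [if_pos hlt]
      congr 1
      rw [max_def]
      split_ifs
      · rfl
      · omega
    · rw [if_neg hlt]
      congr 1
      rw [max_def]
      split_ifs
      · omega
      · rfl

-- the loop invariant of B's single pass
theorem fold_inv (p : List Int) :
    (p.foldl checkStep ((PySem.Set.empty : PySem.Set Int), PySem.Set.empty, 0, none)).1
        = PySem.Set.ofList p
    ∧ (∀ y : Int, y ∈ (p.foldl checkStep ((PySem.Set.empty : PySem.Set Int), PySem.Set.empty, 0, none)).2.1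
        ↔ 2 ≤ p.count y)
    ∧ (p.foldl checkStep ((PySem.Set.empty : PySem.Set Int), PySem.Set.empty, 0, none)).2.2.1 = repSum p
    ∧ (p.foldl checkStep ((PySem.Set.empty : PySem.Set Int), PySem.Set.empty, 0, none)).2.2.2
        = PySem.List.max? p (fun y => y) := by
  classical
  induction p using List.reverseRecOn with
  | nil =>
    refine ⟨rfl, by simp [PySem.Set.empty], by simp [repSum], by simp [PySem.List.max?]⟩
  | append_singleton q x ih =>
    obtain ⟨hseen, hdups, hrep, hmax⟩ := ih
    rw [List.foldl_append]
    set s := q.foldl checkStep ((PySem.Set.empty : PySem.Set Int), PySem.Set.empty, 0, none) with hs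
    simp only [List.foldl]
    have hcnt : ∀ k : Int, (q ++ [x]).count k = q.count k + if x = k then 1 else 0 := by
      intro k; simp [List.count_append, List.count_singleton]
    have hxq : x ∈ q ↔ 1 ≤ q.count x := by
      rw [← List.count_pos_iff]
      omega
    by_cases hxd : x ∈ s.2.1
    · -- x already a known duplicate: 2 ≤ q.count x
      have hc2 : 2 ≤ q.count x := (hdups x).mp hxd
      have hcd : PySem.Set.contains s.2.1 x = true := (PySem.Set.contains_iff _ _).mpr hxd
      simp only [checkStep, hcd, if_pos]
      refine ⟨?_, ?_, ?_, ?_⟩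
      · rw [hseen, ofList_append_singleton,
            set_add_of_mem ((PySem.Set.mem_ofList q x).mpr (hxq.mpr (by omega)))]
      · intro y
        rw [hdups y, hcnt y]
        by_cases hyx : x = y
        · subst hyx; rw [if_pos rfl]; omega
        · simp [hyx]
      · rw [hrep, repSum_append, if_pos hc2]
      · rw [max?_id_append, hmax]
    · by_cases hxs : x ∈ s.1
      · -- second occurrence: q.count x = 1
        have hc1 : q.count x = 1 := by
          have h1 : 1 ≤ q.count x := by
            rw [hseen, PySem.Set.mem_ofList] at hxs
            exact hxq.mp hxs
          have h2 : ¬ 2 ≤ q.count x := fun h => hxd ((hdups x).mpr h)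
          omega
        have hcd : PySem.Set.contains s.2.1 x = false := by
          rw [Bool.eq_false_iff]
          intro h; exact hxd ((PySem.Set.contains_iff _ _).mp h)
        have hcs : PySem.Set.contains s.1 x = true := (PySem.Set.contains_iff _ _).mpr hxs
        simp only [checkStep, hcd, hcs, Bool.false_eq_true, if_false, if_pos]
        refine ⟨?_, ?_, ?_, ?_⟩
        · rw [hseen, ofList_append_singleton,
              set_add_of_mem ((PySem.Set.mem_ofList q x).mpr (hxq.mpr (by omega)))]
        · intro y
          rw [PySem.Set.mem_add, hdups y, hcnt y]
          by_cases hyx : x = y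
          · subst hyx; rw [if_pos rfl]; omega
          · have hyx' : ¬ y = x := fun h => hyx h.symm
            simp [hyx, hyx']
        · rw [hrep, repSum_append, if_neg (by omega), if_pos hc1]
        · rw [max?_id_append, hmax]
      · -- first occurrence: q.count x = 0
        have hc0 : q.count x = 0 := by
          by_contra h
          exact hxs (by rw [hseen, PySem.Set.mem_ofList]; exact hxq.mpr (by omega))
        have hcd : PySem.Set.contains s.2.1 x = false := by
          rw [Bool.eq_false_iff]; intro h; exact hxd ((PySem.Set.contains_iff _ _).mp h)
        have hcs : PySem.Set.contains s.1 x = false := by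
          rw [Bool.eq_false_iff]; intro h; exact hxs ((PySem.Set.contains_iff _ _).mp h)
        simp only [checkStep, hcd, hcs, Bool.false_eq_true, if_false]
        refine ⟨?_, ?_, ?_, ?_⟩
        · rw [hseen]
          exact (ofList_append_singleton q x).symm
        · intro y
          rw [hdups y, hcnt y]
          by_cases hyx : x = y
          · subst hyx; rw [if_pos rfl]; omega
          · simp [hyx]
        · rw [hrep, repSum_append, if_neg (by omega), if_neg (by omega)]
          ring
        · rw [max?_id_append, hmax]

-- Counter's repeat-sum equals the Finset form
theorem itemsRep_eq_repSum (row : List Int) :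
    (PySem.Dict.counter row).items.foldl (fun acc p => if 1 < p.2 then acc + p.1 * p.2 else acc) 0
      = repSum row := by
  classical
  have hR : (PySem.Dict.counter row).items.foldl (fun acc p => if 1 < p.2 then acc + p.1 * p.2 else acc) 0
      = (((PySem.Set.ofList row).filter (fun k => decide (1 < row.count k))).map
          (fun k => k * (row.count k : Int))).sum := by
    rw [PySem.Dict.items_counter, List.foldl_map]
    have : ∀ (acc : Int) (k : Int), k ∈ PySem.Set.ofList row →
        (if 1 < ((row.count k : Int)) then acc + k * (row.count k : Int) else acc)
          = (if 1 < row.count k then acc + k * (row.count k : Int) else acc) := by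
      intro acc k _
      congr 1
      simp
    rw [PySem.List.foldl_congr_mem _ _ _ _ this, PySem.List.foldl_ite_eq_foldl_filter]
    rw [PySem.List.foldl_add _ (fun k => k * (row.count k : Int)) 0]
    simp
  rw [hR]
  have hndf : ((PySem.Set.ofList row).filter (fun k => decide (1 < row.count k))).Nodup :=
    (PySem.Set.nodup_ofList row).filter _
  rw [← List.sum_toFinset _ hndf]
  have htF : ((PySem.Set.ofList row).filter (fun k => decide (1 < row.count k))).toFinset
      = row.toFinset.filter (fun k => 1 < row.count k) := by
    ext k
    simp [List.mem_toFinset, PySem.Set.mem_ofList, Finset.mem_filter]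
  rw [htF, Finset.sum_filter]
  rfl

-- B equals the Counter form
theorem alt_eq_checkC (row : List Int) : check_alt row = checkC row := by
  classical
  obtain ⟨hseen, hdups, hrep, hmax⟩ := fold_inv row
  simp only [check_alt, checkC]
  have hsize : (PySem.Dict.counter row).size = (PySem.Set.ofList row).length := by
    have hk := PySem.Dict.keys_counter (κ := Int) row
    have : (PySem.Dict.counter row).keys.length = (PySem.Dict.counter row).size := by
      simp [PySem.Dict.keys, PySem.Dict.size]
    rw [← this, hk]
  have hofl : (PySem.Set.ofList row).toFinset = row.toFinset := by
    ext x; simp [List.mem_toFinset, PySem.Set.mem_ofList]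
  by_cases hnd : row.Nodup
  · -- no duplicate: both sides are false
    have hcnt1 : ∀ y : Int, row.count y ≤ 1 := List.nodup_iff_count_le_one.mp hnd
    have hempty : (row.foldl checkStep ((PySem.Set.empty : PySem.Set Int), PySem.Set.empty, 0, none)).2.1 = [] := by
      rw [List.eq_nil_iff_forall_not_mem]
      intro y hy
      have := (hdups y).mp hy
      have := hcnt1 y
      omega
    have hlen : (PySem.Set.ofList row).length = row.length := by
      have h1 : (PySem.Set.ofList row).toFinset.card = (PySem.Set.ofList row).length :=
        List.toFinset_card_of_nodup (PySem.Set.nodup_ofList row)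
      have h2 : row.toFinset.card = row.length := List.toFinset_card_of_nodup hnd
      rw [hofl, h2] at h1
      omega
    have hie : (row.foldl checkStep ((PySem.Set.empty : PySem.Set Int), PySem.Set.empty, 0, none)).2.1.isEmpty = true := by
      rw [hempty]
      rfl
    rw [hie, hsize, hlen]
    simp
  · -- a duplicate exists: compare the two tests elementwise
    have hdup : ∃ a : Int, 2 ≤ row.count a := by
      by_contra hno
      push Not at hno
      exact hnd (List.nodup_iff_count_le_one.mpr (fun a => by have := hno a; omega))
    obtain ⟨a, ha⟩ := hdup
    have hlen_ne : ¬ ((PySem.Set.ofList row).length = row.length) := by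
      intro he
      apply hnd
      have h1 : (PySem.Set.ofList row).toFinset.card = (PySem.Set.ofList row).length :=
        List.toFinset_card_of_nodup (PySem.Set.nodup_ofList row)
      rw [hofl, he] at h1
      have hmn : (row : Multiset Int).Nodup :=
        Multiset.toFinset_card_eq_card_iff_nodup.mp (by simpa using h1)
      simpa using hmn
    have hne : row ≠ [] := by
      intro h
      subst h
      simp at ha
    have hnonempty : ¬ ((row.foldl checkStep ((PySem.Set.empty : PySem.Set Int), PySem.Set.empty, 0, none)).2.1 = []) := by
      intro h
      have := (hdups a).mpr ha
      rw [h] at this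
      simp at this
    cases hm : PySem.List.max? row (fun y => y) with
    | none => exact absurd ((PySem.List.max?_eq_none_iff row _).mp hm) hne
    | some m =>
      have hmem : m ∈ row := PySem.List.max?_mem hm
      have hpos : 0 < row.count m := List.count_pos_iff.mpr hmem
      have hgd : (PySem.Dict.counter row).getD m 0 = (row.count m : Int) :=
        PySem.Dict.getD_counter row m
      rw [hmax, hm]
      have hie : (row.foldl checkStep ((PySem.Set.empty : PySem.Set Int), PySem.Set.empty, 0, none)).2.1.isEmpty = false := by
        rw [List.isEmpty_eq_false_iff]
        exact hnonempty
      simp only [hsize, beq_iff_eq, hlen_ne, if_false, hie, Bool.not_false, Bool.true_and,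
        hrep, itemsRep_eq_repSum, hgd]
      congr 1
      by_cases h2 : 2 ≤ row.count m
      · have hin : m ∈ (row.foldl checkStep ((PySem.Set.empty : PySem.Set Int), PySem.Set.empty, 0, none)).2.1 :=
          (hdups m).mpr h2
        rw [(PySem.Set.contains_iff _ _).mpr hin]
        have : ¬ ((row.count m : Int) = 1) := by
          intro h
          have : row.count m = 1 := by exact_mod_cast h
          omega
        simp [this]
      · have hc1 : row.count m = 1 := by omega
        have hnin : ¬ m ∈ (row.foldl checkStep ((PySem.Set.empty : PySem.Set Int), PySem.Set.empty, 0, none)).2.1 :=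
          fun h => h2 ((hdups m).mp h)
        have : PySem.Set.contains (row.foldl checkStep ((PySem.Set.empty : PySem.Set Int), PySem.Set.empty, 0, none)).2.1 m = false := by
          rw [Bool.eq_false_iff]
          intro h
          exact hnin ((PySem.Set.contains_iff _ _).mp h)
        rw [this]
        have : (row.count m : Int) = 1 := by exact_mod_cast hc1
        simp [this]

-- ===== VERDICT (by name: the statement is the Claim_ definition above) =====
theorem check_spec : Claim_equal_check :=
  fun row _ => (check_eq_checkC row).trans (alt_eq_checkC row).symm
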